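-- pv_equiv track=rewrite | github.com/posl/comment_recommendation | script/mod_gen/5_time/en/200_C/3.py | solve
-- ===== SOURCE A (Python) =====
-- def solve(N, A):
--     cnt = [0] * 200
--     for a in A:
--         cnt[a % 200] += 1
--     ans = 0
--     for c in cnt:
--         ans += c * (c - 1) // 2
--     return ans
-- ===== SOURCE B (Python) =====
-- def solve(N, A):
--     seen = {}
--     ans = 0
--     for a in A:
--         r = a % 200
--         c = seen.get(r, 0)
--         ans += c
--         seen[r] = c + 1
--     return ans
-- ===== Notes on version B (the rewrite author's own statement) =====
-- stated objective: alternative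
-- what changed: Replaces the two-phase build-a-200-bucket-table-then-sum-C(c,2) structure with a single incremental pass that adds the running count of each element's residue before incrementing it in a dict.
import Mathlib
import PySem

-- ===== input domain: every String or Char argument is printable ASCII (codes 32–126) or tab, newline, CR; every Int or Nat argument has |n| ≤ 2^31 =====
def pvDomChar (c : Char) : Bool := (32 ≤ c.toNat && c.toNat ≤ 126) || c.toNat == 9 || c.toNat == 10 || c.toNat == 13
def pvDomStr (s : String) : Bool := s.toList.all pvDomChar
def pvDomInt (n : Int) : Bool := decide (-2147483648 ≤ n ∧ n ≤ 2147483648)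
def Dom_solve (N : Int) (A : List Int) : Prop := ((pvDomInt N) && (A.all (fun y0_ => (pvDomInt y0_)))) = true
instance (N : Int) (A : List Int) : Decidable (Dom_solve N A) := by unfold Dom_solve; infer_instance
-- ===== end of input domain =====

-- B replaces A's build-table-then-sum-C(c,2) two-phase pass with one incremental
-- pair-counting pass over a dict of residue counts (alternative decomposition, same cost).

-- ===== PORT A =====
-- cnt[a % 200] += 1  (index is always in range: 0 ≤ a % 200 < 200, len(cnt) = 200)
def pvStepA (cnt : List Int) (a : Int) : List Int :=
  let i := (PySem.Int.mod a 200).toNat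
  cnt.set i (cnt.getD i 0 + 1)

def solve (N : Int) (A : List Int) : Int :=
  let cnt := A.foldl pvStepA (List.replicate 200 (0 : Int))
  cnt.foldl (fun ans c => ans + PySem.Int.floordiv (c * (c - 1)) 2) 0

-- ===== PORT B =====
def pvStepB (st : PySem.Dict Int Int × Int) (a : Int) : PySem.Dict Int Int × Int :=
  let r := PySem.Int.mod a 200
  let c := st.1.getD r 0
  (st.1.insert r (c + 1), st.2 + c)

def solve_alt (N : Int) (A : List Int) : Int :=
  (A.foldl pvStepB ((PySem.Dict.empty : PySem.Dict Int Int), (0 : Int))).2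

-- ===== PRECONDITION & SPEC =====
def Spec_solve (N : Int) (A : List Int) (out : Int) : Prop := out = solve_alt N A
instance (N : Int) (A : List Int) (out : Int) : Decidable (Spec_solve N A out) := by unfold Spec_solve; infer_instance

-- ===== CLAIM (what is proved, stated in full; the proofs are below) =====
def Claim_equal_solve : Prop := ∀ (N : Int) (A : List Int), Dom_solve N A → Spec_solve N A (solve N A)

-- ===== LEMMAS AND PROOFS =====

-- number of elements of A whose residue mod 200 is r (200 > 0, so Python's % = emod)
def pvCount (A : List Int) (r : Int) : Int :=
  (A.countP (fun x => decide (x % 200 = r)) : Int)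

-- C(c,2) summand of A's second loop
def pvG (c : Int) : Int := PySem.Int.floordiv (c * (c - 1)) 2

theorem pvMod_eq (a : Int) : PySem.Int.mod a 200 = a % 200 :=
  PySem.Int.mod_eq_emod_of_pos (by norm_num)

theorem pvG_succ (c : Int) : pvG (c + 1) = pvG c + c := by
  unfold pvG
  rw [PySem.Int.floordiv_eq_ediv_of_pos (by norm_num : (0:Int) < 2),
      PySem.Int.floordiv_eq_ediv_of_pos (by norm_num : (0:Int) < 2)]
  have h : (c + 1) * (c + 1 - 1) = c * (c - 1) + c * 2 := by ring
  rw [h, Int.add_mul_ediv_right _ _ (by norm_num : (2:Int) ≠ 0)]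

-- A's second loop as acc + sum of pvG
theorem pvSumA (l : List Int) (acc : Int) :
    l.foldl (fun ans c => ans + PySem.Int.floordiv (c * (c - 1)) 2) acc
      = acc + (l.map pvG).sum := by
  induction l generalizing acc with
  | nil => simp
  | cons c t ih =>
    rw [List.foldl_cons, ih]
    simp only [List.map_cons, List.sum_cons, pvG]
    ring

theorem pvSolve_eq_sum (N : Int) (A : List Int) :
    solve N A = ((A.foldl pvStepA (List.replicate 200 (0:Int))).map pvG).sum := by
  show (A.foldl pvStepA (List.replicate 200 (0:Int))).foldl
      (fun ans c => ans + PySem.Int.floordiv (c * (c - 1)) 2) 0 = _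
  rw [pvSumA, zero_add]

theorem pvStepA_length (cnt : List Int) (a : Int) :
    (pvStepA cnt a).length = cnt.length := by
  simp [pvStepA]

theorem pvCntA_length (A : List Int) (l : List Int) :
    (A.foldl pvStepA l).length = l.length := by
  induction A generalizing l with
  | nil => rfl
  | cons a t ih => rw [List.foldl_cons, ih, pvStepA_length]

theorem pvStepA_getD (l : List Int) (a : Int) (i : Nat) (hl : l.length = 200) :
    (pvStepA l a).getD i 0 =
      if (a % 200).toNat = i then l.getD i 0 + 1 else l.getD i 0 := by
  have hmnn : 0 ≤ a % 200 := Int.emod_nonneg a (by norm_num)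
  have hmlt : a % 200 < 200 := Int.emod_lt_of_pos a (by norm_num)
  have hj : (a % 200).toNat < l.length := by omega
  simp only [pvStepA, pvMod_eq, List.getD_eq_getElem?_getD, List.getElem?_set]
  by_cases h : (a % 200).toNat = i
  · rw [if_pos h, if_pos hj, h]
    simp
  · rw [if_neg h, if_neg h]

-- invariant of A's first loop: bucket i holds the residue count
theorem pvCntA_getD (A : List Int) (l : List Int) (hl : l.length = 200)
    (i : Nat) (hi : i < 200) :
    (A.foldl pvStepA l).getD i 0 = l.getD i 0 + pvCount A (i : Int) := by
  induction A generalizing l with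
  | nil => simp [pvCount]
  | cons a t ih =>
    have hmnn : 0 ≤ a % 200 := Int.emod_nonneg a (by norm_num)
    have hmlt : a % 200 < 200 := Int.emod_lt_of_pos a (by norm_num)
    rw [List.foldl_cons, ih _ (by rw [pvStepA_length, hl]), pvStepA_getD l a i hl]
    have hcnt : pvCount (a :: t) (i : Int) =
        (if (a % 200).toNat = i then 1 else 0) + pvCount t (i : Int) := by
      simp only [pvCount, List.countP_cons]
      by_cases h : a % 200 = (i : Int)
      · have h1 : (a % 200).toNat = i := by omega
        rw [if_pos (by simpa using h), if_pos h1]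
        push_cast; ring
      · have h1 : ¬ (a % 200).toNat = i := by omega
        rw [if_neg (by simpa using h), if_neg h1]
        push_cast; ring
    rw [hcnt]
    split_ifs with h <;> ring

-- invariant of B's loop: the dict holds the residue counts
theorem pvCntB_getD (A : List Int) (d : PySem.Dict Int Int) (s : Int) (r : Int) :
    ((A.foldl pvStepB (d, s)).1).getD r 0 = d.getD r 0 + pvCount A r := by
  induction A generalizing d s with
  | nil => simp [pvCount]
  | cons a t ih =>
    rw [List.foldl_cons]
    have hstep : pvStepB (d, s) a =
        (d.insert (a % 200) (d.getD (a % 200) 0 + 1), s + d.getD (a % 200) 0) := by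
      simp only [pvStepB, pvMod_eq]
    rw [hstep, ih, PySem.Dict.getD_insert]
    simp only [pvCount, List.countP_cons]
    by_cases h : r = a % 200
    · rw [if_pos h, if_pos (by simp [h]), h]
      push_cast; ring
    · rw [if_neg h, if_neg (by simpa using fun hh : a % 200 = r => h hh.symm)]
      push_cast; ring

-- sum over a list after setting one in-range entry
theorem pvSum_set (l : List Int) (j : Nat) (v : Int) (hj : j < l.length) :
    ((l.set j v).map pvG).sum = (l.map pvG).sum + pvG v - pvG (l.getD j 0) := by
  induction l generalizing j with
  | nil => simp at hj
  | cons c t ih =>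
    cases j with
    | zero => simp [List.set]; ring
    | succ k =>
      have hk : k < t.length := by simpa using hj
      simp only [List.set, List.map_cons, List.sum_cons, List.getD_cons_succ]
      rw [ih k hk]; ring

-- one snoc step on each side
theorem pvSolve_snoc (N a : Int) (A : List Int) :
    solve N (A ++ [a]) = solve N A + pvCount A (a % 200) := by
  have hmnn : 0 ≤ a % 200 := Int.emod_nonneg a (by norm_num)
  have hmlt : a % 200 < 200 := Int.emod_lt_of_pos a (by norm_num)
  have hlen : (A.foldl pvStepA (List.replicate 200 (0:Int))).length = 200 := by
    rw [pvCntA_length, List.length_replicate]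
  have hj : (a % 200).toNat
      < (A.foldl pvStepA (List.replicate 200 (0:Int))).length := by omega
  have hcast : (((a % 200).toNat : Nat) : Int) = a % 200 := Int.toNat_of_nonneg hmnn
  have hgd : (A.foldl pvStepA (List.replicate 200 (0:Int))).getD
      (a % 200).toNat 0 = pvCount A (a % 200) := by
    rw [pvCntA_getD A _ (List.length_replicate) _ (by omega), hcast,
        List.getD_eq_getElem?_getD, List.getElem?_replicate,
        if_pos (by omega : (a % 200).toNat < 200)]
    simp
  rw [pvSolve_eq_sum, pvSolve_eq_sum, List.foldl_append, List.foldl_cons, List.foldl_nil]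
  simp only [pvStepA, pvMod_eq]
  rw [pvSum_set _ _ _ hj, hgd, pvG_succ]
  ring

theorem pvSolveAlt_snoc (N a : Int) (A : List Int) :
    solve_alt N (A ++ [a]) = solve_alt N A + pvCount A (a % 200) := by
  show ((A ++ [a]).foldl pvStepB (PySem.Dict.empty, 0)).2 = _
  rw [List.foldl_append, List.foldl_cons, List.foldl_nil]
  show (A.foldl pvStepB (PySem.Dict.empty, 0)).2
      + (A.foldl pvStepB ((PySem.Dict.empty : PySem.Dict Int Int), (0:Int))).1.getD
          (PySem.Int.mod a 200) 0 = _
  rw [pvMod_eq, pvCntB_getD]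
  have he : (PySem.Dict.empty : PySem.Dict Int Int).getD (a % 200) 0 = 0 := rfl
  rw [he]
  show _ = (A.foldl pvStepB ((PySem.Dict.empty : PySem.Dict Int Int), (0:Int))).2
      + pvCount A (a % 200)
  ring

-- ===== VERDICT (by name: the statement is the Claim_ definition above) =====
theorem solve_spec : Claim_equal_solve := by
  intro N A hdom
  show solve N A = solve_alt N A
  induction A using List.reverseRecOn with
  | nil =>
    have h0 : pvG 0 = 0 := by decide
    rw [pvSolve_eq_sum]
    show (List.map pvG (List.replicate 200 0)).sum
        = (([] : List Int).foldl pvStepB (PySem.Dict.empty, 0)).2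
    rw [List.foldl_nil, List.map_replicate, h0, List.sum_replicate, smul_zero]
  | append_singleton A a ih =>
    have hA : Dom_solve N A := by
      unfold Dom_solve at *
      simp only [List.all_append, Bool.and_eq_true] at hdom ⊢
      tauto
    rw [pvSolve_snoc, pvSolveAlt_snoc, ih hA]
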